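-- pv_equiv track=rewrite | github.com/ryanschostag/freecad-ai | services/freecad-worker/worker/jobs.py | _runner_markers
-- ===== SOURCE A (Python) =====
-- RUNNER_START_MARKER = "RUNNER:START"
--
-- RUNNER_DONE_MARKER = "RUNNER:DONE"
--
-- def _runner_markers(stdout: str, stderr: str) -> tuple[bool, bool]:
--     start_seen = False
--     done_seen = False
--     for line in f"{stdout}\n{stderr}".splitlines():
--         stripped = line.strip()
--         if stripped == RUNNER_START_MARKER:
--             start_seen = True
--         elif stripped == RUNNER_DONE_MARKER:
--             done_seen = True
--     return start_seen, done_seen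
-- ===== SOURCE B (Python) =====
-- RUNNER_START_MARKER = "RUNNER:START"
--
-- RUNNER_DONE_MARKER = "RUNNER:DONE"
--
-- def _seen(marker, lines):
--     return any(line.strip() == marker for line in lines)
--
-- def _runner_markers(stdout: str, stderr: str) -> tuple[bool, bool]:
--     lines = f"{stdout}\n{stderr}".splitlines()
--     return _seen(RUNNER_START_MARKER, lines), _seen(RUNNER_DONE_MARKER, lines)
-- ===== Notes on version B (the rewrite author's own statement) =====
-- stated objective: simpler
-- what changed: Replaces the single accumulate-with-if/elif flag loop by two staged, short-circuiting scans: a helper answers 'is this marker among the stripped lines?' via any(), called once per marker.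
import Mathlib
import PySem

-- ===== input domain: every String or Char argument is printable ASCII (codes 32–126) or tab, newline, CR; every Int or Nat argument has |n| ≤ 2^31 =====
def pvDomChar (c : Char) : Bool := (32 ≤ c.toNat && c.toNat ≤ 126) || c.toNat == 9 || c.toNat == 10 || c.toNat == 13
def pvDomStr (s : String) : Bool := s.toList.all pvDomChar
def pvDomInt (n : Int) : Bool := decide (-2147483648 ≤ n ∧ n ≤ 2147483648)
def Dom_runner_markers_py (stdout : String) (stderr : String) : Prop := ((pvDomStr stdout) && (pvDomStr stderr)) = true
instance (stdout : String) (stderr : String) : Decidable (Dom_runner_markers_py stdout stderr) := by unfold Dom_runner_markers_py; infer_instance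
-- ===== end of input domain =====

-- B replaces A's single accumulating if/elif loop by two staged short-circuiting scans (one `any` per marker); objective: simpler.

-- ===== PORT A =====
-- literal port of A: single pass over the lines, accumulating (start_seen, done_seen)
def runner_markers_py (stdout : String) (stderr : String) : Bool × Bool :=
  (PySem.Str.splitlines (stdout ++ "\n" ++ stderr)).foldl
    (fun st line =>
      let stripped := PySem.Str.strip line
      if stripped = "RUNNER:START" then (true, st.2)
      else if stripped = "RUNNER:DONE" then (st.1, true)
      else st)
    (false, false)

-- ===== PORT B =====
-- port of B's helper _seen: short-circuiting scan asking whether any line strips to the marker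
def seen_marker (marker : String) (lines : List String) : Bool :=
  lines.any (fun line => PySem.Str.strip line == marker)

-- literal port of B: split once, then one staged scan per marker
def runner_markers_py_alt (stdout : String) (stderr : String) : Bool × Bool :=
  let lines := PySem.Str.splitlines (stdout ++ "\n" ++ stderr)
  (seen_marker "RUNNER:START" lines, seen_marker "RUNNER:DONE" lines)

-- ===== PRECONDITION & SPEC =====
def Spec_runner_markers_py (stdout : String) (stderr : String) (out : Bool × Bool) : Prop := out = runner_markers_py_alt stdout stderr
instance (stdout : String) (stderr : String) (out : Bool × Bool) : Decidable (Spec_runner_markers_py stdout stderr out) := by unfold Spec_runner_markers_py; infer_instance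

-- ===== CLAIM (what is proved, stated in full; the proofs are below) =====
def Claim_equal_runner_markers_py : Prop := ∀ (stdout : String) (stderr : String), Dom_runner_markers_py stdout stderr → Spec_runner_markers_py stdout stderr (runner_markers_py stdout stderr)

-- ===== LEMMAS AND PROOFS =====

-- A's fold computes "some line strips to START" / "some line strips to DONE"
theorem runner_markers_foldl (l : List String) (a b : Bool) :
    l.foldl
      (fun st line =>
        let stripped := PySem.Str.strip line
        if stripped = "RUNNER:START" then (true, st.2)
        else if stripped = "RUNNER:DONE" then (st.1, true)
        else st)
      (a, b)
    = (a || l.any (fun line => PySem.Str.strip line == "RUNNER:START"),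
       b || l.any (fun line => PySem.Str.strip line == "RUNNER:DONE")) := by
  induction l generalizing a b with
  | nil => simp
  | cons x xs ih =>
    simp only [List.foldl_cons, List.any_cons]
    by_cases h1 : PySem.Str.strip x = "RUNNER:START"
    · simp [h1, ih]
    · by_cases h2 : PySem.Str.strip x = "RUNNER:DONE"
      · simp [h2, ih]
      · have e1 : (PySem.Str.strip x == "RUNNER:START") = false := by simpa using h1
        have e2 : (PySem.Str.strip x == "RUNNER:DONE") = false := by simpa using h2
        simp [h1, h2, e1, e2, ih]

-- ===== VERDICT =====
theorem runner_markers_py_spec : Claim_equal_runner_markers_py := by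
  intro stdout stderr _
  unfold Spec_runner_markers_py runner_markers_py runner_markers_py_alt seen_marker
  rw [runner_markers_foldl]
  simp
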